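-- pv_equiv track=rewrite | github.com/bideaug/projet_commun | Cul_de_chouette/cul_de_chouette_function.py | Verificateur_de_des
-- ===== SOURCE A (Python) =====
-- def Verificateur_de_des(de) :
--     i = 1
--     is_ok = False
--     de = int(de)
--     while i < 7:
--         if i == de :
--             is_ok = True
--             return is_ok
--         i = i+1
--     return is_ok
-- ===== SOURCE B (Python) =====
-- def Verificateur_de_des(de):
--     return 1 <= int(de) <= 6
-- ===== Notes on version B (the rewrite author's own statement) =====
-- stated objective: simpler
-- what changed: Replaces the fixed-length while-loop linear search for a matching die value with a single closed-form chained range comparison.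
import Mathlib
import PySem

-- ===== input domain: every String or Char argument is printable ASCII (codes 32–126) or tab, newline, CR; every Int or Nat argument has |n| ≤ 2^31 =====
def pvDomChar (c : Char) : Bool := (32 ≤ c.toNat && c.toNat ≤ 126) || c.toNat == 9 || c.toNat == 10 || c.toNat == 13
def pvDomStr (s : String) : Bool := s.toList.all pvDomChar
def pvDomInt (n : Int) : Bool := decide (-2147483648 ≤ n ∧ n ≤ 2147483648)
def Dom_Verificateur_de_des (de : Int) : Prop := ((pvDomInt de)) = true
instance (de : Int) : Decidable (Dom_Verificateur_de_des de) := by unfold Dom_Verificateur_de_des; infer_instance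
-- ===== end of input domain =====

-- B replaces A's while-loop scan over 1..6 with a single closed-form bounds check (simpler).

-- ===== PORT A =====
-- the while loop: i counts up from 1 while i < 7, early-returns true on i == de
def VdLoop (de i : Int) : Bool :=
  if _h : i < 7 then
    if i = de then true else VdLoop de (i + 1)
  else false
termination_by (7 - i).toNat
decreasing_by omega

def Verificateur_de_des (de : Int) : Bool := VdLoop de 1

-- ===== PORT B =====
def Verificateur_de_des_alt (de : Int) : Bool := decide (1 ≤ de ∧ de ≤ 6)

-- ===== PRECONDITION & SPEC =====
def Spec_Verificateur_de_des (de : Int) (out : Bool) : Prop := out = Verificateur_de_des_alt de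
instance (de : Int) (out : Bool) : Decidable (Spec_Verificateur_de_des de out) := by unfold Spec_Verificateur_de_des; infer_instance

-- ===== CLAIM (what is proved, stated in full; the proofs are below) =====
def Claim_equal_Verificateur_de_des : Prop := ∀ (de : Int), Dom_Verificateur_de_des de → Spec_Verificateur_de_des de (Verificateur_de_des de)

-- ===== LEMMAS AND PROOFS =====
theorem vdLoop_eq (de i : Int) : VdLoop de i = decide (i ≤ de ∧ de ≤ 6) := by
  unfold VdLoop
  split_ifs with h1 h2
  · simp; omega
  · rw [vdLoop_eq, decide_eq_decide]
    omega
  · simp; omega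
termination_by (7 - i).toNat
decreasing_by omega

-- ===== VERDICT (by name: the statement is the Claim_ definition above) =====
theorem Verificateur_de_des_spec : Claim_equal_Verificateur_de_des := by
  intro de _
  unfold Spec_Verificateur_de_des Verificateur_de_des Verificateur_de_des_alt
  exact vdLoop_eq de 1
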